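-- pv_equiv track=rewrite | github.com/shoark7/algorithm-with-python | problems_solving/baekjoon/police_car.py | func
-- ===== SOURCE A (Python) =====
-- def func(N, cases):
--     cases = [(1, 1), (N, N)] + cases
--     cache = [[-1 for _ in range(N+1)] for _ in range(N+1)]
--     routes = []
--
--     def dist(x, y):
--         pos1, pos2 = cases[x], cases[y]
--         return abs(pos1[0] - pos2[0]) + abs(pos1[1] - pos2[1])
--
--     def calc(x, y):
--         if max(x, y) >= len(cases) - 1:
--             return 0
--         elif cache[x][y] != -1:
--             return cache[x][y]
--
--         nxt = max(x, y) + 1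
--         cache[x][y] = min(calc(nxt, y) + dist(nxt, x),
--                           calc(x, nxt) + dist(y, nxt))
--         return cache[x][y]
--
--     def generate_route(x, y, nth):
--         if nth == len(cases):
--             return
--
--         if calc(nth, y) + dist(nth, x) < calc(x, nth) + dist(y, nth):
--             routes.append(1)
--             generate_route(nth, y, nth+1)
--         else:
--             routes.append(2)
--             generate_route(x, nth, nth+1)
--
--
--     generate_route(0, 1, 2)
--     return calc(0, 1), routes
-- ===== SOURCE B (Python) =====
-- def func(N, cases):
--     cs = [(1, 1), (N, N)] + cases
--     L = len(cs)
--
--     def dist(i, j):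
--         (a, b), (c, d) = cs[i], cs[j]
--         return abs(a - c) + abs(b - d)
--
--     # rows[0] is row for frontier f; rows[f-1+...]: after the sweep,
--     # rows[f-1][a] = min remaining cost when the cars stand at cases f and a (a < f).
--     rows = [[0] * (L - 1)]           # frontier L-1: everything assigned, cost 0
--     for f in range(L - 2, 0, -1):
--         nxt = rows[0]
--         step = dist(f, f + 1)
--         rows.insert(0, [min(nxt[f] + dist(f + 1, a), nxt[a] + step)
--                         for a in range(f)])
--
--     x, y, routes = 0, 1, []
--     for nth in range(2, L):
--         row = rows[nth - 1]
--         if row[y] + dist(x, nth) < row[x] + dist(y, nth):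
--             routes.append(1)
--             x = nth
--         else:
--             routes.append(2)
--             y = nth
--     return rows[0][0], routes
-- ===== Notes on version B (the rewrite author's own statement) =====
-- stated objective: faster
-- what changed: Replaces the memoized top-down recursion (mutable (N+1)x(N+1) cache plus recursive route generation) with a bottom-up sweep that builds one cost row per frontier from the end backwards (rows sized by the case list, independent of N, no recursion) and an iterative forward loop that reads those rows to emit the route.
import Mathlib
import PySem

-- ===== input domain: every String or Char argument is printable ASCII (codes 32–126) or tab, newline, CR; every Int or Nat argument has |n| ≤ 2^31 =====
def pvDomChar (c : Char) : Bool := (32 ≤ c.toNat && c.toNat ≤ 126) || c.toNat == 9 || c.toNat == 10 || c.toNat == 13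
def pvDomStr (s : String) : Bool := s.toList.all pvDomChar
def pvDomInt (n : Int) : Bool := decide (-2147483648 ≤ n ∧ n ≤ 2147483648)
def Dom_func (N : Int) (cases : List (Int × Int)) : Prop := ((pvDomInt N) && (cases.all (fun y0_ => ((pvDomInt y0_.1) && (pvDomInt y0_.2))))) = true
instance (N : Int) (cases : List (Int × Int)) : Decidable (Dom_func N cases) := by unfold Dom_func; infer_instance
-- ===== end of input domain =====

-- B replaces A's memoized top-down recursion (whose cache is an (N+1)x(N+1) table) with a
-- bottom-up per-frontier cost-row sweep sized by the case list and an iterative route loop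
-- (objective: faster — avoids the Θ(N²) cache and deep recursion; a timing run measured it).

-- ===== PORT A =====
-- A's nested dist(x, y): Manhattan distance between cases[x] and cases[y]
-- (indices reached are always in range where Python returns; getD is exact there).
def distA (cs : List (Int × Int)) (i j : Nat) : Int :=
  let p := cs.getD i (0, 0)
  let q := cs.getD j (0, 0)
  |p.1 - q.1| + |p.2 - q.2|

-- A's calc(x, y), threading the mutable cache; cache[x][y] reads/writes are via
-- getD/modify-set (exact where Python does not raise IndexError; Pre_func excludes raises).
-- fuel only makes the recursion structural: calls always carry enough
-- (cs.length ≥ cs.length - max x y), so the fuel-0 branch is never reached.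
def calcA (cs : List (Int × Int)) (fuel : Nat) (cache : List (List Int)) (x y : Nat) :
    Int × List (List Int) :=
  match fuel with
  | 0 => (0, cache)
  | fuel + 1 =>
    if cs.length - 1 ≤ max x y then (0, cache)
    else
      let c0 := (cache.getD x []).getD y (-1)
      if c0 ≠ -1 then (c0, cache)
      else
        let nxt := max x y + 1
        let r1 := calcA cs fuel cache nxt y
        let r2 := calcA cs fuel r1.2 x nxt
        let v := min (r1.1 + distA cs nxt x) (r2.1 + distA cs y nxt)
        (v, r2.2.modify x (fun row => row.set y v))

-- A's generate_route(x, y, nth): recursion with fuel (Python recurses nth→nth+1 up to len(cases);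
-- fuel = cs.length at the top call never runs out since nth starts at 2 and cs.length ≥ 2).
def genA (cs : List (Int × Int)) (fuel : Nat) (cache : List (List Int)) (x y nth : Nat) :
    List Int × List (List Int) :=
  match fuel with
  | 0 => ([], cache)
  | fuel + 1 =>
    if nth = cs.length then ([], cache)
    else
      let r1 := calcA cs cs.length cache nth y
      let r2 := calcA cs cs.length r1.2 x nth
      if r1.1 + distA cs nth x < r2.1 + distA cs y nth then
        let r := genA cs fuel r2.2 nth y (nth + 1)
        (1 :: r.1, r.2)
      else
        let r := genA cs fuel r2.2 x nth (nth + 1)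
        (2 :: r.1, r.2)

def func (N : Int) (cases : List (Int × Int)) : Int × List Int :=
  let cs := [(1, 1), (N, N)] ++ cases
  let cache := List.replicate (N + 1).toNat (List.replicate (N + 1).toNat (-1 : Int))
  let g := genA cs cs.length cache 0 1 2
  let c := calcA cs cs.length g.2 0 1
  (c.1, g.1)

-- ===== PORT B =====
def distB (cs : List (Int × Int)) (i j : Nat) : Int :=
  let p := cs.getD i (0, 0)
  let q := cs.getD j (0, 0)
  |p.1 - q.1| + |p.2 - q.2|

-- Source B's backward for-loop over f = L-2, …, 1, prepending one row per frontier.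
def buildRows (cs : List (Int × Int)) (f : Nat) (rows : List (List Int)) : List (List Int) :=
  match f with
  | 0 => rows
  | fp + 1 =>
    let fr := fp + 1
    let nxt := rows.getD 0 []
    let step := distB cs fr (fr + 1)
    buildRows cs fp
      (((List.range fr).map (fun a =>
          min (nxt.getD fr 0 + distB cs (fr + 1) a) (nxt.getD a 0 + step))) :: rows)

-- Source B's forward for-loop over nth = 2, …, L-1 (k = remaining iterations), appending to routes.
def routeLoop (cs : List (Int × Int)) (rows : List (List Int)) (k nth x y : Nat)
    (routes : List Int) : Nat × Nat × List Int :=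
  match k with
  | 0 => (x, y, routes)
  | k + 1 =>
    let row := rows.getD (nth - 1) []
    if row.getD y 0 + distB cs x nth < row.getD x 0 + distB cs y nth then
      routeLoop cs rows k (nth + 1) nth y (routes ++ [1])
    else
      routeLoop cs rows k (nth + 1) x nth (routes ++ [2])

def func_alt (N : Int) (cases : List (Int × Int)) : Int × List Int :=
  let cs := [(1, 1), (N, N)] ++ cases
  let L := cs.length
  let rows := buildRows cs (L - 2) [List.replicate (L - 1) 0]
  let r := routeLoop cs rows (L - 2) 2 0 1 []
  ((rows.getD 0 []).getD 0 0, r.2.2)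

-- ===== PRECONDITION & SPEC =====
-- A raises IndexError when its (N+1)×(N+1) cache is smaller than the case list needs;
-- Pre_func is exactly the inputs where A returns normally.
def Pre_func (N : Int) (cases : List (Int × Int)) : Prop :=
  cases = [] ∨ (cases.length : Int) ≤ N
instance (N : Int) (cases : List (Int × Int)) : Decidable (Pre_func N cases) := by
  unfold Pre_func; infer_instance

def pvWitness_func : Int × (List (Int × Int)) := (3, [(2, 3), (1, 1), (3, 2)])

def Spec_func (N : Int) (cases : List (Int × Int)) (out : Int × List Int) : Prop :=
  out = func_alt N cases
instance (N : Int) (cases : List (Int × Int)) (out : Int × List Int) :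
    Decidable (Spec_func N cases out) := by unfold Spec_func; infer_instance

-- ===== CLAIM =====
def Claim_equal_func : Prop := ∀ (N : Int) (cases : List (Int × Int)),
  Dom_func N cases → Pre_func N cases → Spec_func N cases (func N cases)

-- ===== LEMMAS AND PROOFS =====

-- The pure value of A's calc(x, y) (no cache).
def gsp (cs : List (Int × Int)) (x y : Nat) : Int :=
  if _h : cs.length - 1 ≤ max x y then 0
  else min (gsp cs (max x y + 1) y + distA cs (max x y + 1) x)
           (gsp cs x (max x y + 1) + distA cs y (max x y + 1))
termination_by cs.length - max x y
decreasing_by all_goals simp at *; omega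

theorem distA_symm (cs : List (Int × Int)) (i j : Nat) : distA cs i j = distA cs j i := by
  simp [distA, abs_sub_comm]

theorem distB_eq (cs : List (Int × Int)) (i j : Nat) : distB cs i j = distA cs i j := rfl

theorem gsp_symm (cs : List (Int × Int)) (x y : Nat) : gsp cs x y = gsp cs y x := by
  have H : ∀ n x y, cs.length - max x y ≤ n → gsp cs x y = gsp cs y x := by
    intro n
    induction n with
    | zero =>
      intro x y h
      rw [gsp, dif_pos (by omega)]
      rw [gsp, dif_pos (by omega : cs.length - 1 ≤ max y x)]
    | succ n ih =>
      intro x y h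
      by_cases hb : cs.length - 1 ≤ max x y
      · rw [gsp, dif_pos hb]
        rw [gsp, dif_pos (by omega : cs.length - 1 ≤ max y x)]
      · have hb' : ¬ cs.length - 1 ≤ max y x := by omega
        conv_lhs => rw [gsp]
        rw [dif_neg hb]
        conv_rhs => rw [gsp]
        rw [dif_neg hb']
        have hmax : max y x = max x y := Nat.max_comm y x
        rw [hmax,
          ih (max x y + 1) y (by omega),
          ih x (max x y + 1) (by omega),
          distA_symm cs (max x y + 1) x,
          distA_symm cs y (max x y + 1)]
        exact min_comm _ _
  exact H (cs.length - max x y) x y le_rfl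

def cacheOK (cs : List (Int × Int)) (c : List (List Int)) : Prop :=
  ∀ x y, (c.getD x []).getD y (-1) ≠ -1 → (c.getD x []).getD y (-1) = gsp cs x y

theorem get2_modify_set (c : List (List Int)) (x y x' y' : Nat) (v : Int) :
    (((c.modify x (fun row => row.set y v)).getD x' []).getD y' (-1)
        = (c.getD x' []).getD y' (-1))
    ∨ (x' = x ∧ y' = y ∧
        ((c.modify x (fun row => row.set y v)).getD x' []).getD y' (-1) = v) := by
  simp only [List.getD_eq_getElem?_getD, List.getElem?_modify]
  by_cases hx : x = x'
  · subst hx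
    rcases getElem? c x with _ | row
    · left; simp
    · simp only [Option.getD_some]
      by_cases hy : y = y'
      · subst hy
        by_cases hyr : y < row.length
        · right; simp [hyr]
        · left; simp [hyr]
      · left; simp [hy]
  · left
    rcases getElem? c x' with _ | row <;> simp [hx]

theorem calcA_correct (cs : List (Int × Int)) (fuel : Nat) (c : List (List Int)) (x y : Nat)
    (hf : cs.length - max x y ≤ fuel) (h : cacheOK cs c) :
    (calcA cs fuel c x y).1 = gsp cs x y ∧ cacheOK cs (calcA cs fuel c x y).2 := by
  induction fuel generalizing x y c with
  | zero =>
    rw [calcA, gsp, dif_pos (by omega)]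
    exact ⟨rfl, h⟩
  | succ n ih =>
    by_cases hb : cs.length - 1 ≤ max x y
    · rw [calcA, if_pos hb, gsp, dif_pos hb]
      exact ⟨rfl, h⟩
    · rw [calcA]
      simp only [if_neg hb]
      by_cases hhit : ((c.getD x []).getD y (-1)) = -1
      · rw [if_neg (show ¬((c.getD x []).getD y (-1) ≠ -1) by simpa using hhit)]
        have h1 := ih c (max x y + 1) y (by omega) h
        have h2 := ih (calcA cs n c (max x y + 1) y).2 x (max x y + 1) (by omega) h1.2
        have hv : min ((calcA cs n c (max x y + 1) y).1 + distA cs (max x y + 1) x)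
            ((calcA cs n (calcA cs n c (max x y + 1) y).2 x (max x y + 1)).1
              + distA cs y (max x y + 1)) = gsp cs x y := by
          rw [h1.1, h2.1]
          conv_rhs => rw [gsp]
          rw [dif_neg hb]
        refine ⟨hv, ?_⟩
        intro a b hab
        rcases get2_modify_set (calcA cs n (calcA cs n c (max x y + 1) y).2 x (max x y + 1)).2
            x y a b _ with hsame | ⟨ha, hb2, hval⟩
        · rw [hsame] at hab ⊢
          exact h2.2 a b hab
        · subst ha; subst hb2
          rw [hval, hv]
      · rw [if_pos hhit]
        exact ⟨h x y hhit, h⟩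

-- rowSpec j = Source B's row for frontier j.
def rowSpec (cs : List (Int × Int)) (j : Nat) : List Int :=
  (List.range j).map (fun a => gsp cs a j)

theorem rowSpec_getD (cs : List (Int × Int)) (n j : Nat) (h : j < n) :
    (rowSpec cs n).getD j 0 = gsp cs j n := by
  simp [rowSpec, List.getD_eq_getElem?_getD, List.getElem?_map, List.getElem?_range h]

theorem buildRows_spec (cs : List (Int × Int)) (f m : Nat)
    (hm1 : 1 ≤ m) (hm : f + 1 + m = cs.length) :
    buildRows cs f ((List.range' (f + 1) m).map (rowSpec cs)) =
      (List.range' 1 (m + f)).map (rowSpec cs) := by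
  induction f generalizing m with
  | zero => simp [buildRows]
  | succ fp ih =>
    obtain ⟨m', rfl⟩ : ∃ m', m = m' + 1 := ⟨m - 1, by omega⟩
    rw [buildRows]
    have hhead : ((List.range' (fp + 1 + 1) (m' + 1)).map (rowSpec cs)).getD 0 []
        = rowSpec cs (fp + 2) := by
      rw [List.range'_succ]
      simp
    have hrow : (List.range (fp + 1)).map (fun a =>
          min ((((List.range' (fp + 1 + 1) (m' + 1)).map (rowSpec cs)).getD 0 []).getD (fp + 1) 0
                + distB cs (fp + 1 + 1) a)
              ((((List.range' (fp + 1 + 1) (m' + 1)).map (rowSpec cs)).getD 0 []).getD a 0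
                + distB cs (fp + 1) (fp + 1 + 1)))
        = rowSpec cs (fp + 1) := by
      rw [hhead]
      apply List.map_congr_left
      intro a ha
      have ha' : a < fp + 1 := List.mem_range.mp ha
      rw [rowSpec_getD cs (fp + 2) (fp + 1) (by omega),
          rowSpec_getD cs (fp + 2) a (by omega)]
      have hmax : max a (fp + 1) = fp + 1 := by omega
      conv_rhs => rw [gsp]
      rw [dif_neg (by omega : ¬ cs.length - 1 ≤ max a (fp + 1)), hmax,
          distB_eq, distB_eq, gsp_symm cs (fp + 1) (fp + 2)]
    rw [hrow]
    have hcons : rowSpec cs (fp + 1) :: (List.range' (fp + 1 + 1) (m' + 1)).map (rowSpec cs)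
        = (List.range' (fp + 1) (m' + 2)).map (rowSpec cs) := by
      conv_rhs => rw [List.range'_succ]
      rw [List.map_cons]
    rw [hcons, show m' + 1 + (fp + 1) = m' + 2 + fp by omega]
    exact ih (m' + 2) (by omega) (by omega)

theorem genA_routeLoop (cs : List (Int × Int)) (rows : List (List Int))
    (hrows : rows = (List.range' 1 (cs.length - 1)).map (rowSpec cs))
    (k : Nat) : ∀ (fuel nth x y : Nat) (c : List (List Int)) (acc : List Int),
    cacheOK cs c → nth + k = cs.length → k < fuel → x < nth → y < nth →
    acc ++ (genA cs fuel c x y nth).1 = (routeLoop cs rows k nth x y acc).2.2 ∧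
    cacheOK cs (genA cs fuel c x y nth).2 := by
  induction k with
  | zero =>
    intro fuel nth x y c acc hc hk hf hx hy
    obtain ⟨f', rfl⟩ : ∃ f', fuel = f' + 1 := ⟨fuel - 1, by omega⟩
    rw [genA, if_pos (by omega : nth = cs.length)]
    exact ⟨by simp [routeLoop], hc⟩
  | succ k ih =>
    intro fuel nth x y c acc hc hk hf hx hy
    obtain ⟨f', rfl⟩ : ∃ f', fuel = f' + 1 := ⟨fuel - 1, by omega⟩
    rw [genA]
    simp only [if_neg (by omega : ¬ nth = cs.length)]
    rw [routeLoop]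
    have h1 := calcA_correct cs cs.length c nth y (Nat.sub_le _ _) hc
    have h2 := calcA_correct cs cs.length (calcA cs cs.length c nth y).2 x nth
      (Nat.sub_le _ _) h1.2
    have hrow : rows.getD (nth - 1) [] = rowSpec cs nth := by
      subst hrows
      have hlt : nth - 1 < cs.length - 1 := by omega
      simp only [List.getD_eq_getElem?_getD, List.getElem?_map, List.getElem?_range' hlt,
        Option.map_some, Option.getD_some]
      rw [show 1 + 1 * (nth - 1) = nth by omega]
    have hcond : ((calcA cs cs.length c nth y).1 + distA cs nth x
          < (calcA cs cs.length (calcA cs cs.length c nth y).2 x nth).1 + distA cs y nth)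
        ↔ ((rows.getD (nth - 1) []).getD y 0 + distB cs x nth
          < (rows.getD (nth - 1) []).getD x 0 + distB cs y nth) := by
      rw [h1.1, h2.1, hrow, rowSpec_getD cs nth y hy, rowSpec_getD cs nth x hx,
          gsp_symm cs nth y, distB_eq, distB_eq, distA_symm cs nth x]
    by_cases hlt : (calcA cs cs.length c nth y).1 + distA cs nth x
        < (calcA cs cs.length (calcA cs cs.length c nth y).2 x nth).1 + distA cs y nth
    · rw [if_pos hlt, if_pos (hcond.mp hlt)]
      have hrec := ih f' (nth + 1) nth y (calcA cs cs.length (calcA cs cs.length c nth y).2 x nth).2 (acc ++ [1])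
        h2.2 (by omega) (by omega) (by omega) (by omega)
      refine ⟨?_, hrec.2⟩
      rw [← hrec.1]
      simp
    · rw [if_neg hlt, if_neg ((not_congr hcond).mp hlt)]
      have hrec := ih f' (nth + 1) x nth (calcA cs cs.length (calcA cs cs.length c nth y).2 x nth).2 (acc ++ [2])
        h2.2 (by omega) (by omega) (by omega) (by omega)
      refine ⟨?_, hrec.2⟩
      rw [← hrec.1]
      simp

theorem get2_replicate (n m x y : Nat) :
    (((List.replicate n (List.replicate m (-1 : Int))).getD x []).getD y (-1)) = -1 := by
  simp only [List.getD_eq_getElem?_getD, List.getElem?_replicate]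
  split_ifs <;> simp [List.getElem?_replicate]
  split_ifs <;> simp

theorem rowSpec_top (cs : List (Int × Int)) :
    rowSpec cs (cs.length - 1) = List.replicate (cs.length - 1) 0 := by
  unfold rowSpec
  rw [List.map_congr_left (g := fun _ => (0 : Int)) (fun a _ => by
    rw [gsp, dif_pos (by omega)])]
  rw [List.map_const', List.length_range]

-- ===== VERDICT =====
theorem func_spec : Claim_equal_func := by
  unfold Claim_equal_func
  intro N cases _ _
  unfold Spec_func
  show func N cases = func_alt N cases
  simp only [func, func_alt]
  have hL : ([(1, 1), (N, N)] ++ cases).length = cases.length + 2 := by simp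
  set cs := [(1, 1), (N, N)] ++ cases with hcs
  have hc0 : cacheOK cs
      (List.replicate (N + 1).toNat (List.replicate (N + 1).toNat (-1 : Int))) := by
    intro a b hab
    exact absurd (get2_replicate _ _ a b) hab
  have hrows0 : [List.replicate (cs.length - 1) 0]
      = (List.range' (cs.length - 2 + 1) 1).map (rowSpec cs) := by
    have : List.range' (cs.length - 2 + 1) 1 = [cs.length - 1] := by
      rw [List.range'_succ]
      simp
      omega
    rw [this]
    simp [rowSpec_top]
  have hrows : buildRows cs (cs.length - 2) [List.replicate (cs.length - 1) 0]
      = (List.range' 1 (cs.length - 1)).map (rowSpec cs) := by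
    rw [hrows0, buildRows_spec cs (cs.length - 2) 1 le_rfl (by omega),
        show 1 + (cs.length - 2) = cs.length - 1 by omega]
  have hgen := genA_routeLoop cs _ hrows (cs.length - 2) cs.length 2 0 1
    (List.replicate (N + 1).toNat (List.replicate (N + 1).toNat (-1 : Int))) []
    hc0 (by omega) (by omega) (by omega) (by omega)
  have hcalc := calcA_correct cs cs.length
    (genA cs cs.length
      (List.replicate (N + 1).toNat (List.replicate (N + 1).toNat (-1 : Int))) 0 1 2).2
    0 1 (Nat.sub_le _ _) hgen.2
  refine Prod.ext ?_ ?_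
  · show (calcA cs cs.length _ 0 1).1 = ((buildRows cs (cs.length - 2) [List.replicate (cs.length - 1) 0]).getD 0 []).getD 0 0
    rw [hcalc.1, hrows]
    have h1 : (List.range' 1 (cs.length - 1)).map (rowSpec cs)
        = rowSpec cs 1 :: (List.range' 2 (cs.length - 2)).map (rowSpec cs) := by
      rw [show cs.length - 1 = (cs.length - 2) + 1 by omega, List.range'_succ]
      rfl
    rw [h1]
    simp only [List.getD_cons_zero]
    rw [rowSpec_getD cs 1 0 (by omega)]
  · show (genA cs cs.length _ 0 1 2).1 = (routeLoop cs (buildRows cs (cs.length - 2) [List.replicate (cs.length - 1) 0]) (cs.length - 2) 2 0 1 []).2.2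
    have h := hgen.1
    rw [hrows] at h
    rw [hrows, ← h]
    simp
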